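/-
  GENERATED by c/gen_labels.py from the tables of the image gif (FUNCTIONS LOOPS CHECKS insns sym; the PROGRAM only (the base is in the shared library))
  -- do not edit; re-run the script when the image is rebuilt.

  `Gif.L.<function>.at_<hex address>`: cut points added by a SPLIT of a proof unit (the `at` lines of --extra). The name is the address: no label is ever renumbered, and Labels.lean does not change.
  Statements and proofs cite these names, never the numbers: a rebuild that only shifts code changes this file alone.
  Per function: entry, size (bytes), insns (instructions), cut<k> (the addresses the units table cites: segment
  entries, exits, cut points), loop<k> (loop heads), ret<k> (the return address of the k-th call), chk<k> (the call
  instruction of the k-th check site). One address may have several names.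
-/
import Gif.Labels
namespace Gif.L
open X86

abbrev prog_main.at_105042 : Word := 0x105042  -- split cut: test rsi,rsi | gif_driver.c:250 ?
abbrev prog_main.at_105082 : Word := 0x105082  -- split cut: mov DWORD PTR [rbx+0xc00000],0x0 | gif_driver.c:246 ?

abbrev digest_map.at_105553 : Word := 0x105553  -- split cut: cmp r14d,r12d | gif_driver.c:121 ?
abbrev digest_map.at_105558 : Word := 0x105558  -- split cut: mov rax,rbp | gif_driver.c:127 ?

abbrev digest_extensions.at_10568d : Word := 0x10568d  -- split cut: cmp r12d,r14d | gif_driver.c:136 ?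
abbrev digest_extensions.at_1056f0 : Word := 0x1056f0  -- split cut: mov rax,rbx | gif_driver.c:144 ?

abbrev digest_file.at_10580b : Word := 0x10580b  -- split cut: lea rdi,[r12+0x8] | gif_driver.c:153 ?
abbrev digest_file.at_10585a : Word := 0x10585a  -- split cut: lea rdi,[r12+0x18] | gif_driver.c:156 ?
abbrev digest_file.at_10591a : Word := 0x10591a  -- split cut: mov rdi,rax | gif_driver.c:163 ?
abbrev digest_file.at_10594b : Word := 0x10594b  -- split cut: lea rdi,[rbx+0x18] | gif_driver.c:167 ?
abbrev digest_file.at_1059af : Word := 0x1059af  -- split cut: cmp DWORD PTR [rsp+0xc],r13d | gif_driver.c:158 ?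
abbrev digest_file.at_1059ba : Word := 0x1059ba  -- split cut: lea rdi,[r12+0x58] | gif_driver.c:172 ?

abbrev DGifGetWord.at_106063 : Word := 0x106063  -- split cut: mov edx,0x2 | dgif_lib.c:744 ?
abbrev DGifGetWord.at_10608c : Word := 0x10608c  -- split cut: mov QWORD PTR [rbx+0xc00000],0x0 | dgif_lib.c:740 ?

abbrev DGifSetupDecompress.at_1061c8 : Word := 0x1061c8  -- split cut: lea rdi,[rdi+0x70] | dgif_lib.c:817 ?
abbrev DGifSetupDecompress.at_106205 : Word := 0x106205  -- split cut: lea rdi,[r12+0x58] | dgif_lib.c:834 ?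
abbrev DGifSetupDecompress.at_10632d : Word := 0x10632d  -- split cut: cmp ebx,0xfff | dgif_lib.c:847 ?
abbrev DGifSetupDecompress.at_10633a : Word := 0x10633a  -- split cut: mov QWORD PTR [r13+0xc00000],0x0 | dgif_lib.c:813 ?

abbrev DGifBufferedInput.at_10659d : Word := 0x10659d  -- split cut: mov eax,ebp | dgif_lib.c:1148 ?
abbrev DGifBufferedInput.at_1065a8 : Word := 0x1065a8  -- split cut: mov edx,0x1 | dgif_lib.c:1123 ?
abbrev DGifBufferedInput.at_1065fe : Word := 0x1065fe  -- split cut: movzx edx,dl | dgif_lib.c:1135 ?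

abbrev DGifDecompressInput.at_1067eb : Word := 0x1067eb  -- split cut: lea rdi,[rdi+0x70] | dgif_lib.c:1073 ?
abbrev DGifDecompressInput.at_106807 : Word := 0x106807  -- split cut: lea rdi,[rbx+0x2c] | dgif_lib.c:1083 ?
abbrev DGifDecompressInput.at_106874 : Word := 0x106874  -- split cut: mov QWORD PTR [r14+0xc00000],0x0 | dgif_lib.c:1068 ?
abbrev DGifDecompressInput.at_10688e : Word := 0x10688e  -- split cut: lea rdi,[rbx+0x30] | dgif_lib.c:1093 ?

abbrev DGifDecompressLine.at_106b3d : Word := 0x106b3d  -- split cut: lea rdi,[rdi+0x70] | dgif_lib.c:866 ?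
abbrev DGifDecompressLine.at_106be3 : Word := 0x106be3  -- split cut: test ebx,ebx | dgif_lib.c:883 ?
abbrev DGifDecompressLine.at_106c87 : Word := 0x106c87  -- split cut: lea rdi,[r14+0x10] | dgif_lib.c:905 ?
abbrev DGifDecompressLine.at_106cfb : Word := 0x106cfb  -- split cut: mov r12d,0x0 | dgif_lib.c:902 ?
abbrev DGifDecompressLine.at_106d06 : Word := 0x106d06  -- split cut: movsxd rax,r12d | dgif_lib.c:923 ?
abbrev DGifDecompressLine.at_106d47 : Word := 0x106d47  -- split cut: mov edx,DWORD PTR [rsp+0x10] | dgif_lib.c:942 ?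
abbrev DGifDecompressLine.at_106da7 : Word := 0x106da7  -- split cut: mov edx,DWORD PTR [rsp+0x10] | dgif_lib.c:936 ?
abbrev DGifDecompressLine.at_106e4b : Word := 0x106e4b  -- split cut: cmp ebx,0xffe | dgif_lib.c:955 ?
abbrev DGifDecompressLine.at_106e67 : Word := 0x106e67  -- split cut: mov ebp,DWORD PTR [rsp+0x38] | dgif_lib.c:961 ?
abbrev DGifDecompressLine.at_106f12 : Word := 0x106f12  -- split cut: test ebx,ebx | dgif_lib.c:970 ?
abbrev DGifDecompressLine.at_106f43 : Word := 0x106f43  -- split cut: mov edx,DWORD PTR [rsp+0x10] | dgif_lib.c:987 ?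
abbrev DGifDecompressLine.at_106f7d : Word := 0x106f7d  -- split cut: mov eax,DWORD PTR [rsp+0x28] | dgif_lib.c:888 ?
abbrev DGifDecompressLine.at_106fa0 : Word := 0x106fa0  -- split cut: mov r12d,DWORD PTR [rsp+0x70] | dgif_lib.c:893 ?
abbrev DGifDecompressLine.at_106fea : Word := 0x106fea  -- split cut: cmp DWORD PTR [rsp+0x14],0x1002 | dgif_lib.c:974 ?
abbrev DGifDecompressLine.at_107045 : Word := 0x107045  -- split cut: mov edx,DWORD PTR [rsp+0x10] | dgif_lib.c:991 ?
abbrev DGifDecompressLine.at_10709d : Word := 0x10709d  -- split cut: mov QWORD PTR [r15+0xc00000],0x0 | dgif_lib.c:861 ?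

abbrev GifMakeMapObject.at_10793b : Word := 0x10793b  -- split cut: movsxd r15,ebp | gifalloc.c:58 ?
abbrev GifMakeMapObject.at_1079ac : Word := 0x1079ac  -- split cut: mov rax,rbx | gifalloc.c:74 ?

abbrev GifAddExtensionBlock.at_107ba6 : Word := 0x107ba6  -- split cut: mov rdi,rbx | gifalloc.c:247 ?
abbrev GifAddExtensionBlock.at_107c05 : Word := 0x107c05  -- split cut: test rbp,rbp | gifalloc.c:256 ?
abbrev GifAddExtensionBlock.at_107c4d : Word := 0x107c4d  -- split cut: add rsp,0x8 | gifalloc.c:265 ?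

abbrev GifFreeExtensions.at_107dd9 : Word := 0x107dd9  -- split cut: mov rdi,rbp | gifalloc.c:276 ?

abbrev GifFreeSavedImages.at_107f18 : Word := 0x107f18  -- split cut: lea rdi,[rbp+0x48] | gifalloc.c:438 ?
abbrev GifFreeSavedImages.at_107f87 : Word := 0x107f87  -- split cut: mov rdi,r12 | gifalloc.c:451 ?

abbrev DGifGetScreenDesc.at_1080c6 : Word := 0x1080c6  -- split cut: lea rdi,[rdi+0x70] | dgif_lib.c:252 ?
abbrev DGifGetScreenDesc.at_1080f7 : Word := 0x1080f7  -- split cut: mov QWORD PTR [rbp+0xc00000],0x0 | dgif_lib.c:248 ?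
abbrev DGifGetScreenDesc.at_10813b : Word := 0x10813b  -- split cut: lea rsi,[rsp+0x20] | dgif_lib.c:266 ?
abbrev DGifGetScreenDesc.at_108152 : Word := 0x108152  -- split cut: movzx r13d,BYTE PTR [rsp+0x20] | dgif_lib.c:272 ?
abbrev DGifGetScreenDesc.at_108211 : Word := 0x108211  -- split cut: mov edi,0x1 | dgif_lib.c:280 ?
abbrev DGifGetScreenDesc.at_108253 : Word := 0x108253  -- split cut: mov r12,QWORD PTR [rbx+0x18] | dgif_lib.c:288 ?
abbrev DGifGetScreenDesc.at_108284 : Word := 0x108284  -- split cut: lea rdi,[rbx+0x18] | dgif_lib.c:296 ?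

abbrev DGifOpen.at_1086d0 : Word := 0x1086d0  -- split cut: mov edi,0x78 | dgif_lib.c:172 ?
abbrev DGifOpen.at_10871a : Word := 0x10871a  -- split cut: mov esi,0x6168 | dgif_lib.c:186 ?
abbrev DGifOpen.at_10879e : Word := 0x10879e  -- split cut: lea rsi,[rsp+0x20] | dgif_lib.c:206 ?
abbrev DGifOpen.at_1087b9 : Word := 0x1087b9  -- split cut: mov BYTE PTR [rsp+0x26],0x0 | dgif_lib.c:217 ?
abbrev DGifOpen.at_1087da : Word := 0x1087da  -- split cut: mov rdi,rbx | dgif_lib.c:227 ?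
abbrev DGifOpen.at_108816 : Word := 0x108816  -- split cut: mov QWORD PTR [r12+0xc00000],0x0 | dgif_lib.c:167 ?

abbrev DGifGetRecordType.at_108bc9 : Word := 0x108bc9  -- split cut: lea rdi,[rdi+0x70] | dgif_lib.c:327 ?
abbrev DGifGetRecordType.at_108bf5 : Word := 0x108bf5  -- split cut: mov QWORD PTR [r12+0xc00000],0x0 | dgif_lib.c:325 ?
abbrev DGifGetRecordType.at_108c3e : Word := 0x108c3e  -- split cut: movzx eax,BYTE PTR [rsp+0x20] | dgif_lib.c:342 ?

abbrev DGifGetImageHeader.at_108e49 : Word := 0x108e49  -- split cut: lea rdi,[rdi+0x70] | dgif_lib.c:364 ?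
abbrev DGifGetImageHeader.at_108e78 : Word := 0x108e78  -- split cut: mov QWORD PTR [rbp+0xc00000],0x0 | dgif_lib.c:361 ?
abbrev DGifGetImageHeader.at_108ecd : Word := 0x108ecd  -- split cut: lea rsi,[rbx+0x34] | dgif_lib.c:375 ?
abbrev DGifGetImageHeader.at_108ef8 : Word := 0x108ef8  -- split cut: movzx r13d,BYTE PTR [rsp+0x30] | dgif_lib.c:384 ?
abbrev DGifGetImageHeader.at_108f4e : Word := 0x108f4e  -- split cut: lea rdi,[rbx+0x30] | dgif_lib.c:419 ?
abbrev DGifGetImageHeader.at_108ffe : Word := 0x108ffe  -- split cut: mov r13,QWORD PTR [rbx+0x40] | dgif_lib.c:404 ?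
abbrev DGifGetImageHeader.at_10902f : Word := 0x10902f  -- split cut: lea rdi,[rbx+0x40] | dgif_lib.c:412 ?

abbrev DGifGetImageDesc.at_10949a : Word := 0x10949a  -- split cut: mov eax,ebp | dgif_lib.c:479 ?
abbrev DGifGetImageDesc.at_1094b5 : Word := 0x1094b5  -- split cut: lea rdi,[rbx+0x48] | dgif_lib.c:444 ?
abbrev DGifGetImageDesc.at_109503 : Word := 0x109503  -- split cut: mov rbp,QWORD PTR [rbx+0x48] | dgif_lib.c:461 ?
abbrev DGifGetImageDesc.at_109535 : Word := 0x109535  -- split cut: lea rdi,[rbx+0x40] | dgif_lib.c:463 ?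
abbrev DGifGetImageDesc.at_109583 : Word := 0x109583  -- split cut: lea rdi,[rbp+0x20] | dgif_lib.c:472 ?
abbrev DGifGetImageDesc.at_1095e6 : Word := 0x1095e6  -- split cut: mov edi,0x38 | dgif_lib.c:455 ?

abbrev DGifGetExtensionNext.at_10986c : Word := 0x10986c  -- split cut: lea rdi,[rdi+0x70] | dgif_lib.c:600 ?
abbrev DGifGetExtensionNext.at_1098a6 : Word := 0x1098a6  -- split cut: mov QWORD PTR [rbp+0xc00000],0x0 | dgif_lib.c:598 ?
abbrev DGifGetExtensionNext.at_1098c3 : Word := 0x1098c3  -- split cut: mov r12d,eax | dgif_lib.c:624 ?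

abbrev DGifGetExtension.at_109aca : Word := 0x109aca  -- split cut: lea rdi,[rdi+0x70] | dgif_lib.c:572 ?
abbrev DGifGetExtension.at_109afb : Word := 0x109afb  -- split cut: mov QWORD PTR [rbp+0xc00000],0x0 | dgif_lib.c:570 ?
abbrev DGifGetExtension.at_109b45 : Word := 0x109b45  -- split cut: movzx r12d,BYTE PTR [rsp+0x20] | dgif_lib.c:586 ?

abbrev DGifCloseFile.at_109cb5 : Word := 0x109cb5  -- split cut: lea rdi,[rbx+0x18] | dgif_lib.c:695 ?
abbrev DGifCloseFile.at_109cdd : Word := 0x109cdd  -- split cut: lea rdi,[rbx+0x48] | dgif_lib.c:700 ?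
abbrev DGifCloseFile.at_109d06 : Word := 0x109d06  -- split cut: lea rsi,[rbx+0x58] | dgif_lib.c:705 ?
abbrev DGifCloseFile.at_109d13 : Word := 0x109d13  -- split cut: lea rdi,[rbx+0x70] | dgif_lib.c:708 ?

abbrev DGifGetCodeNext.at_109f8c : Word := 0x109f8c  -- split cut: lea rdi,[rdi+0x70] | dgif_lib.c:781 ?
abbrev DGifGetCodeNext.at_109fc6 : Word := 0x109fc6  -- split cut: mov QWORD PTR [rbp+0xc00000],0x0 | dgif_lib.c:779 ?
abbrev DGifGetCodeNext.at_109fe3 : Word := 0x109fe3  -- split cut: mov r12d,eax | dgif_lib.c:808 ?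

abbrev DGifGetLine.at_10a230 : Word := 0x10a230  -- split cut: lea rdi,[rdi+0x70] | dgif_lib.c:486 ?
abbrev DGifGetLine.at_10a28e : Word := 0x10a28e  -- split cut: mov QWORD PTR [r12+0xc00000],0x0 | dgif_lib.c:484 ?
abbrev DGifGetLine.at_10a2c4 : Word := 0x10a2c4  -- split cut: mov edx,r13d | dgif_lib.c:504 ?
abbrev DGifGetLine.at_10a2ea : Word := 0x10a2ea  -- split cut: lea rsi,[rsp+0x20] | dgif_lib.c:512 ?

abbrev DGifDecreaseImageCounter.at_10a4b1 : Word := 0x10a4b1  -- split cut: lea rdi,[rbx+0x48] | dgif_lib.c:1161 ?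
abbrev DGifDecreaseImageCounter.at_10a4f2 : Word := 0x10a4f2  -- split cut: lea rdi,[rbx+0x20] | dgif_lib.c:1166 ?
abbrev DGifDecreaseImageCounter.at_10a531 : Word := 0x10a531  -- split cut: add rsp,0x8 | dgif_lib.c:1179 ?

abbrev DGifSlurp.at_10a6d3 : Word := 0x10a6d3  -- split cut: lea rdi,[rdi+0x58] | dgif_lib.c:1193 ?
abbrev DGifSlurp.at_10a6f9 : Word := 0x10a6f9  -- split cut: mov rdi,rbp | dgif_lib.c:1203 ?
abbrev DGifSlurp.at_10a70b : Word := 0x10a70b  -- split cut: lea rdi,[rbp+0x48] | dgif_lib.c:1207 ?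
abbrev DGifSlurp.at_10a777 : Word := 0x10a777  -- split cut: imul ebx,ecx | dgif_lib.c:1216 ?
abbrev DGifSlurp.at_10a7bd : Word := 0x10a7bd  -- split cut: mov edx,ebx | dgif_lib.c:1259 ?
abbrev DGifSlurp.at_10a7d4 : Word := 0x10a7d4  -- split cut: lea rdi,[rbp+0x58] | dgif_lib.c:1266 ?
abbrev DGifSlurp.at_10a81f : Word := 0x10a81f  -- split cut: cmp DWORD PTR [rsp+0x20],0x4 | dgif_lib.c:1315 ?
abbrev DGifSlurp.at_10a82a : Word := 0x10a82a  -- split cut: lea rsi,[rsp+0x20] | dgif_lib.c:1197 ?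
abbrev DGifSlurp.at_10a853 : Word := 0x10a853  -- split cut: lea rax,[rsp+0x60] | dgif_lib.c:1277 ?
abbrev DGifSlurp.at_10a8a2 : Word := 0x10a8a2  -- split cut: lea rsi,[rsp+0x40] | dgif_lib.c:1291 ?
abbrev DGifSlurp.at_10a8ed : Word := 0x10a8ed  -- split cut: mov QWORD PTR [r14+0xc00000],0x0 | dgif_lib.c:1186 ?
abbrev DGifSlurp.at_10a948 : Word := 0x10a948  -- split cut: cmp r15d,0x3 | dgif_lib.c:1241 ?
abbrev DGifSlurp.at_10a96a : Word := 0x10a96a  -- split cut: lea rdi,[r12+0xc] | dgif_lib.c:1243 ?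

abbrev gif_decode.at_10adda : Word := 0x10adda  -- split cut: mov DWORD PTR [rsp+0x30],0x0 | gif_driver.c:183 ?
abbrev gif_decode.at_10aeb3 : Word := 0x10aeb3  -- split cut: mov QWORD PTR [rsp+0x40],r13 | gif_driver.c:199 ?
abbrev gif_decode.at_10aedd : Word := 0x10aedd  -- split cut: mov rbp,rax | gif_driver.c:203 ?
abbrev gif_decode.at_10af77 : Word := 0x10af77  -- split cut: lea rsi,[rbx+0x28] | gif_driver.c:220 ?
abbrev gif_decode.at_10af93 : Word := 0x10af93  -- split cut: mov DWORD PTR [rsp+0x30],0x0 | gif_driver.c:223 ?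
abbrev gif_decode.at_10afdb : Word := 0x10afdb  -- split cut: mov QWORD PTR [r12+0xc00000],0x0 | gif_driver.c:180 ?

end Gif.L
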